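-- pv_equiv track=rewrite | github.com/Lucas-Brasil-Silva/Projeto_Escala_Folgas | gerador_escala_trabalho.py | dividir_semanas
-- ===== SOURCE A (Python) =====
-- def dividir_semanas(dias):
--     """
--     Descrição: Divide os dias em semanas, excluindo os domingos.
--     Parâmetros:
--       - dias (list): Lista de dias gerada pela função dias_mes.
--     Retorna: Uma lista de semanas de trabalho.
--     """
--
--     semanas = []
--     dados = []
--     for nome,dia in dias:
--         if nome != 'Sunday':
--             dados.append([nome,dia])
--         else:
--             if len(dados) != 0:
--                 semanas.append(dados)
--             dados = []
--     if len(dados) != 0: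
--         semanas.append(dados)
--     return semanas
-- ===== SOURCE B (Python) =====
-- def dividir_semanas(dias):
--     """Index-scan version: skip Sundays, slice out each maximal non-Sunday run."""
--     semanas = []
--     i = 0
--     n = len(dias)
--     while i < n:
--         if dias[i][0] == 'Sunday':
--             i += 1
--         else:
--             j = i
--             while j < n and dias[j][0] != 'Sunday':
--                 j += 1
--             semanas.append([[nome, dia] for nome, dia in dias[i:j]])
--             i = j
--     return semanas
-- ===== Notes on version B (the rewrite author's own statement) =====
-- stated objective: alternative
-- what changed: Replaces A's pending-buffer-and-flush accumulator with a two-pointer scan that slices out each maximal non-Sunday run directly (skip Sundays, emit each run as one slice).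
import Mathlib
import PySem

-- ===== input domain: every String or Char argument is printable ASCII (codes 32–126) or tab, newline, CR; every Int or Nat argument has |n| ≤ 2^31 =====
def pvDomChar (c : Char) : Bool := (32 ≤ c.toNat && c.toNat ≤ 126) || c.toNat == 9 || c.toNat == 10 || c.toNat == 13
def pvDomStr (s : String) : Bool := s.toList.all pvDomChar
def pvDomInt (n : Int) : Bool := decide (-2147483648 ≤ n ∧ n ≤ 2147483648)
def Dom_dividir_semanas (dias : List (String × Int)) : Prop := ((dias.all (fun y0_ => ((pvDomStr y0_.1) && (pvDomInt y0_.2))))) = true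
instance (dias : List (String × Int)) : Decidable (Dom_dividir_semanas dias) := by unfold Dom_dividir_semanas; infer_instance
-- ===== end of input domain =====

-- B replaces A's pending-buffer-and-flush accumulator with a two-pointer scan emitting each maximal non-Sunday run (alternative decomposition, same cost).


-- ===== PORT A =====
-- A's loop body: append to the pending buffer on a non-Sunday, flush it on a Sunday.
def stepA (acc : List (List (String × Int)) × List (String × Int)) (nd : String × Int) :
    List (List (String × Int)) × List (String × Int) :=
  if nd.1 != "Sunday" then (acc.1, acc.2 ++ [(nd.1, nd.2)])
  else if acc.2.length != 0 then (acc.1 ++ [acc.2], []) else (acc.1, [])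

def dividir_semanas (dias : List (String × Int)) : List (List (String × Int)) :=
  let st := dias.foldl stepA ([], [])
  if st.2.length != 0 then st.1 ++ [st.2] else st.1

-- ===== PORT B =====
-- B: skip a Sunday; otherwise emit the maximal non-Sunday run (inner j-scan = takeWhile/dropWhile) and continue after it.
def dividir_semanas_alt (dias : List (String × Int)) : List (List (String × Int)) :=
  match dias with
  | [] => []
  | (n, x) :: rest =>
    if n == "Sunday" then dividir_semanas_alt rest
    else ((n, x) :: rest.takeWhile (fun p => p.1 != "Sunday")) ::
         dividir_semanas_alt (rest.dropWhile (fun p => p.1 != "Sunday"))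
termination_by dias.length
decreasing_by
  · simp
  · simp
    exact List.length_dropWhile_le _ _

-- ===== PRECONDITION & SPEC =====
def Spec_dividir_semanas (dias : List (String × Int)) (out : List (List (String × Int))) : Prop := out = dividir_semanas_alt dias
instance (dias : List (String × Int)) (out : List (List (String × Int))) : Decidable (Spec_dividir_semanas dias out) := by unfold Spec_dividir_semanas; infer_instance

-- ===== CLAIM (what is proved, stated in full; the proofs are below) =====
def Claim_equal_dividir_semanas : Prop := ∀ (dias : List (String × Int)), Dom_dividir_semanas dias → Spec_dividir_semanas dias (dividir_semanas dias)

-- ===== LEMMAS AND PROOFS =====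

-- A's fold with accumulator (s, d), followed by the final flush.
def finA (s : List (List (String × Int))) (d : List (String × Int)) (l : List (String × Int)) :
    List (List (String × Int)) :=
  let st := l.foldl stepA (s, d)
  if st.2.length != 0 then st.1 ++ [st.2] else st.1

lemma finA_eq : ∀ (N : Nat) (l : List (String × Int)), l.length ≤ N →
    (∀ s, finA s [] l = s ++ dividir_semanas_alt l) ∧
    (∀ s d, d ≠ [] → finA s d l =
      s ++ (d ++ l.takeWhile (fun p => p.1 != "Sunday")) ::
        dividir_semanas_alt (l.dropWhile (fun p => p.1 != "Sunday"))) := by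
  intro N
  induction N with
  | zero =>
    intro l hl
    have : l = [] := List.length_eq_zero_iff.mp (Nat.le_zero.mp hl)
    subst this
    constructor
    · intro s; simp [finA, dividir_semanas_alt]
    · intro s d hd
      simp [finA, dividir_semanas_alt, hd]
  | succ N ih =>
    intro l hl
    match l with
    | [] =>
      constructor
      · intro s; simp [finA, dividir_semanas_alt]
      · intro s d hd
        simp [finA, dividir_semanas_alt, hd]
    | (nm, x) :: rest =>
      have hrest : rest.length ≤ N := by simpa using hl
      have hdrop : (rest.dropWhile (fun p => p.1 != "Sunday")).length ≤ N :=
        le_trans (List.length_dropWhile_le _ _) hrest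
      by_cases h : nm = "Sunday"
      · subst h
        constructor
        · intro s
          have e1 : finA s [] (("Sunday", x) :: rest) = finA s [] rest := by
            simp [finA, stepA]
          rw [e1, (ih rest hrest).1]
          simp [dividir_semanas_alt]
        · intro s d hd
          have e1 : finA s d (("Sunday", x) :: rest) = finA (s ++ [d]) [] rest := by
            simp [finA, stepA, hd]
          rw [e1, (ih rest hrest).1]
          simp [dividir_semanas_alt, List.takeWhile, List.dropWhile]
      · constructor
        · intro s
          have e1 : finA s [] ((nm, x) :: rest) = finA s [(nm, x)] rest := by
            simp [finA, stepA, h]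
          rw [e1, (ih rest hrest).2 s [(nm, x)] (by simp)]
          simp [dividir_semanas_alt, h]
        · intro s d hd
          have e1 : finA s d ((nm, x) :: rest) = finA s (d ++ [(nm, x)]) rest := by
            simp [finA, stepA, h]
          have hb : (nm != "Sunday") = true := by simp [h]
          rw [e1, (ih rest hrest).2 s (d ++ [(nm, x)]) (by simp)]
          simp [List.takeWhile, List.dropWhile, hb]

theorem dividir_semanas_spec : Claim_equal_dividir_semanas := by
  intro dias _
  unfold Spec_dividir_semanas
  have h := (finA_eq dias.length dias le_rfl).1 []
  simpa [finA, dividir_semanas] using h
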